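-- pv_equiv track=rewrite | github.com/ssakgul/artieksi | artieksi.py | hesapla
-- ===== SOURCE A (Python) =====
-- def hesapla(tutulan,tahmin):
--     tutulan=str(tutulan).rjust(4,"0")
--     tahmin=str(tahmin).rjust(4,"0")
--     artı,eksi=0,0
--     for i in range(0,4):
--         for j in range(0,4):
--             if tahmin[i]==tutulan[j]:
--                 if i==j:
--                     artı+=1
--                 else:
--                     eksi+=1
--     return artı,eksi
-- ===== SOURCE B (Python) =====
-- def hesapla(tutulan, tahmin):
--     u = str(tutulan).rjust(4, "0")[:4]
--     t = str(tahmin).rjust(4, "0")[:4]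
--     fu = {}
--     ft = {}
--     arti = 0
--     for i in range(4):
--         fu[u[i]] = fu.get(u[i], 0) + 1
--         ft[t[i]] = ft.get(t[i], 0) + 1
--         if t[i] == u[i]:
--             arti += 1
--     total = 0
--     for c, n in ft.items():
--         total += n * fu.get(c, 0)
--     return arti, total - arti
-- ===== Notes on version B (the rewrite author's own statement) =====
-- stated objective: alternative
-- what changed: Replaces A's 4x4 nested positional scan with frequency tables: one pass builds character counters of both padded codes (and the diagonal match count), then the cross-match total is the sum of products of corresponding frequencies, from which the diagonal is subtracted.
import Mathlib
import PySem

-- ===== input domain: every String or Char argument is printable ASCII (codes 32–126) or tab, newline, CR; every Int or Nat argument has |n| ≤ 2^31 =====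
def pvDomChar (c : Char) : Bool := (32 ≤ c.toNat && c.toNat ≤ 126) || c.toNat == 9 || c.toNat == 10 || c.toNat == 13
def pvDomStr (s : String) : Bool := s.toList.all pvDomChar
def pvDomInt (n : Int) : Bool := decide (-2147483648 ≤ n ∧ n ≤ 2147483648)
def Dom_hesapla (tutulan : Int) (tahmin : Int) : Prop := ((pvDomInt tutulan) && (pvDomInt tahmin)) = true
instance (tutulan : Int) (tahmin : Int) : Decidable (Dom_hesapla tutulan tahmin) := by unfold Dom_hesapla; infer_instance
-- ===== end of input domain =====

-- B replaces A's fixed 4x4 nested positional scan by character frequency tables: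
-- one pass builds counters of both padded codes and the diagonal match count, then
-- the cross total is the sum of products of corresponding frequencies; objective: alternative.

-- str(x).rjust(4, "0") as a list of characters (shared string preparation of both versions)
def pvPad4 (n : Int) : List Char :=
  List.replicate (4 - (PySem.Int.toChars n).length) '0' ++ PySem.Int.toChars n

-- ===== PORT A =====
def hesapla (tutulan : Int) (tahmin : Int) : Int × Int :=
  let tut := pvPad4 tutulan
  let tah := pvPad4 tahmin
  (PySem.List.pyRange 0 4 1).foldl (fun (st : Int × Int) i =>
    (PySem.List.pyRange 0 4 1).foldl (fun st j =>
      -- tahmin[i] / tutulan[j]: both padded strings have length ≥ 4, so indexing never raises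
      if PySem.List.pyGetD tah i ' ' = PySem.List.pyGetD tut j ' ' then
        if i = j then (st.1 + 1, st.2) else (st.1, st.2 + 1)
      else st) st) ((0 : Int), (0 : Int))

-- ===== PORT B =====
def hesapla_alt (tutulan : Int) (tahmin : Int) : Int × Int :=
  let u := PySem.List.slice (pvPad4 tutulan) none (some 4)
  let t := PySem.List.slice (pvPad4 tahmin) none (some 4)
  -- one pass: fu, ft frequency dicts and the diagonal count arti (u[i]/t[i] never raise: both lists have length 4)
  let st := (PySem.List.pyRange 0 4 1).foldl
    (fun (st : PySem.Dict Char Int × PySem.Dict Char Int × Int) i =>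
      let uc := PySem.List.pyGetD u i ' '
      let tc := PySem.List.pyGetD t i ' '
      (st.1.insert uc (st.1.getD uc 0 + 1),
       st.2.1.insert tc (st.2.1.getD tc 0 + 1),
       st.2.2 + if tc = uc then 1 else 0))
    (PySem.Dict.empty, PySem.Dict.empty, (0 : Int))
  -- total: sum over ft.items of n * fu.get(c, 0)
  let total := st.2.1.items.foldl (fun a kv => a + kv.2 * st.1.getD kv.1 0) 0
  (st.2.2, total - st.2.2)

-- ===== PRECONDITION & SPEC =====
def Spec_hesapla (tutulan : Int) (tahmin : Int) (out : Int × Int) : Prop := out = hesapla_alt tutulan tahmin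
instance (tutulan : Int) (tahmin : Int) (out : Int × Int) : Decidable (Spec_hesapla tutulan tahmin out) := by unfold Spec_hesapla; infer_instance

-- ===== CLAIM (what is proved, stated in full; the proofs are below) =====
def Claim_equal_hesapla : Prop := ∀ (tutulan : Int) (tahmin : Int), Dom_hesapla tutulan tahmin → Spec_hesapla tutulan tahmin (hesapla tutulan tahmin)

-- ===== LEMMAS AND PROOFS =====

lemma pvPad4_len (n : Int) : 4 ≤ (pvPad4 n).length := by
  simp [pvPad4]; omega

lemma list4 (l : List Char) (h : 4 ≤ l.length) : ∃ a b c d r, l = a::b::c::d::r := by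
  match l, h with
  | a::b::c::d::r, _ => exact ⟨a, b, c, d, r, rfl⟩

lemma pgetD0 (c0 c1 c2 c3 : Char) (r : List Char) :
    PySem.List.pyGetD (c0::c1::c2::c3::r) (0:Int) ' ' = c0 := by
  rw [show (0:Int) = ((0:Nat):Int) by norm_num, PySem.List.pyGetD_natCast]; rfl
lemma pgetD1 (c0 c1 c2 c3 : Char) (r : List Char) :
    PySem.List.pyGetD (c0::c1::c2::c3::r) (1:Int) ' ' = c1 := by
  rw [show (1:Int) = ((1:Nat):Int) by norm_num, PySem.List.pyGetD_natCast]; rfl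
lemma pgetD2 (c0 c1 c2 c3 : Char) (r : List Char) :
    PySem.List.pyGetD (c0::c1::c2::c3::r) (2:Int) ' ' = c2 := by
  rw [show (2:Int) = ((2:Nat):Int) by norm_num, PySem.List.pyGetD_natCast]; rfl
lemma pgetD3 (c0 c1 c2 c3 : Char) (r : List Char) :
    PySem.List.pyGetD (c0::c1::c2::c3::r) (3:Int) ' ' = c3 := by
  rw [show (3:Int) = ((3:Nat):Int) by norm_num, PySem.List.pyGetD_natCast]; rfl

lemma slice4 (c0 c1 c2 c3 : Char) (r : List Char) :
    PySem.List.slice (c0::c1::c2::c3::r) none (some 4) = [c0, c1, c2, c3] := by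
  rw [show (4:Int) = ((4:Nat):Int) by norm_num, PySem.List.slice_to_natCast]
  rfl

-- A's inner loop (j over 0..3) for a fixed outer index i, written out for each i
lemma inner0 (c0 c1 c2 c3 d : Char) (r : List Char) (st : Int × Int) :
    List.foldl (fun (st : Int × Int) j =>
      if d = PySem.List.pyGetD (c0::c1::c2::c3::r) j ' ' then
        if (0:Int) = j then (st.1 + 1, st.2) else (st.1, st.2 + 1)
      else st) st [0, 1, 2, 3]
    = (st.1 + (if d = c0 then 1 else 0),
       st.2 + ((if d = c1 then 1 else 0) + (if d = c2 then 1 else 0) + (if d = c3 then 1 else 0))) := by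
  norm_num [List.foldl, pgetD0, pgetD1, pgetD2, pgetD3]
  split_ifs <;> simp [Prod.ext_iff] <;> ring

lemma inner1 (c0 c1 c2 c3 d : Char) (r : List Char) (st : Int × Int) :
    List.foldl (fun (st : Int × Int) j =>
      if d = PySem.List.pyGetD (c0::c1::c2::c3::r) j ' ' then
        if (1:Int) = j then (st.1 + 1, st.2) else (st.1, st.2 + 1)
      else st) st [0, 1, 2, 3]
    = (st.1 + (if d = c1 then 1 else 0),
       st.2 + ((if d = c0 then 1 else 0) + (if d = c2 then 1 else 0) + (if d = c3 then 1 else 0))) := by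
  norm_num [List.foldl, pgetD0, pgetD1, pgetD2, pgetD3]
  split_ifs <;> simp [Prod.ext_iff] <;> ring

lemma inner2 (c0 c1 c2 c3 d : Char) (r : List Char) (st : Int × Int) :
    List.foldl (fun (st : Int × Int) j =>
      if d = PySem.List.pyGetD (c0::c1::c2::c3::r) j ' ' then
        if (2:Int) = j then (st.1 + 1, st.2) else (st.1, st.2 + 1)
      else st) st [0, 1, 2, 3]
    = (st.1 + (if d = c2 then 1 else 0),
       st.2 + ((if d = c0 then 1 else 0) + (if d = c1 then 1 else 0) + (if d = c3 then 1 else 0))) := by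
  norm_num [List.foldl, pgetD0, pgetD1, pgetD2, pgetD3]
  split_ifs <;> simp [Prod.ext_iff] <;> ring

lemma inner3 (c0 c1 c2 c3 d : Char) (r : List Char) (st : Int × Int) :
    List.foldl (fun (st : Int × Int) j =>
      if d = PySem.List.pyGetD (c0::c1::c2::c3::r) j ' ' then
        if (3:Int) = j then (st.1 + 1, st.2) else (st.1, st.2 + 1)
      else st) st [0, 1, 2, 3]
    = (st.1 + (if d = c3 then 1 else 0),
       st.2 + ((if d = c0 then 1 else 0) + (if d = c1 then 1 else 0) + (if d = c2 then 1 else 0))) := by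
  norm_num [List.foldl, pgetD0, pgetD1, pgetD2, pgetD3]
  split_ifs <;> simp [Prod.ext_iff] <;> ring

-- sum over nodup keys of an indicator concentrated at c
lemma sum_map_ite (c : Char) (f : Char → Int) :
    ∀ (keys : List Char), keys.Nodup → c ∈ keys →
      (keys.map (fun k => if c = k then f k else 0)).sum = f c := by
  intro keys
  induction keys with
  | nil => intro _ h; cases h
  | cons k ks ih =>
    intro hnd hmem
    rcases List.nodup_cons.mp hnd with ⟨hk, hnd'⟩
    by_cases hck : c = k
    · subst hck
      have : (ks.map (fun k' => if c = k' then f k' else 0)).sum = 0 := by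
        apply List.sum_eq_zero
        intro x hx
        rcases List.mem_map.mp hx with ⟨y, hy, rfl⟩
        have : c ≠ y := fun h => hk (h ▸ hy)
        simp [this]
      simp [this]
    · have hmem' : c ∈ ks := by
        rcases List.mem_cons.mp hmem with h | h
        · exact absurd h hck
        · exact h
      simp [hck, ih hnd' hmem']

-- grouping: summing count(k) * f(k) over a complete nodup key list equals summing f over the list
lemma group_sum (f : Char → Int) :
    ∀ (t keys : List Char), keys.Nodup → (∀ c ∈ t, c ∈ keys) →
      (keys.map (fun k => (t.count k : Int) * f k)).sum = (t.map f).sum := by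
  intro t
  induction t with
  | nil => intro keys _ _; simp
  | cons c t' ih =>
    intro keys hnd hsub
    have h1 : (keys.map (fun k => ((c :: t').count k : Int) * f k))
        = keys.map (fun k => (t'.count k : Int) * f k + (if c = k then f k else 0)) := by
      apply List.map_congr_left
      intro k _
      by_cases h : c = k
      · subst h; simp; ring
      · have : ¬ (k = c) := fun hh => h hh.symm
        simp [h]
    rw [h1]
    have h2 : (keys.map (fun k => (t'.count k : Int) * f k + (if c = k then f k else 0))).sum
        = (keys.map (fun k => (t'.count k : Int) * f k)).sum
          + (keys.map (fun k => if c = k then f k else 0)).sum := by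
      rw [← List.sum_map_add]
    rw [h2, ih keys hnd (fun x hx => hsub x (List.mem_cons_of_mem _ hx)),
        sum_map_ite c f keys hnd (hsub c (List.mem_cons_self))]
    simp; ring

-- B's one-pass fold over the four indices, with the two 4-char codes exposed
lemma bfold (c0 c1 c2 c3 d0 d1 d2 d3 : Char) :
    List.foldl
      (fun (st : PySem.Dict Char Int × PySem.Dict Char Int × Int) i =>
        let uc := PySem.List.pyGetD [c0,c1,c2,c3] i ' '
        let tc := PySem.List.pyGetD [d0,d1,d2,d3] i ' '
        (st.1.insert uc (st.1.getD uc 0 + 1),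
         st.2.1.insert tc (st.2.1.getD tc 0 + 1),
         st.2.2 + if tc = uc then 1 else 0))
      (PySem.Dict.empty, PySem.Dict.empty, (0 : Int)) [0, 1, 2, 3]
    = (PySem.Dict.counter [c0,c1,c2,c3], PySem.Dict.counter [d0,d1,d2,d3],
       (if d0 = c0 then 1 else 0) + (if d1 = c1 then 1 else 0)
         + (if d2 = c2 then 1 else 0) + (if d3 = c3 then 1 else 0)) := by
  simp only [List.foldl, pgetD0, pgetD1, pgetD2, pgetD3]
  refine Prod.ext ?_ (Prod.ext ?_ ?_)
  · exact (PySem.Dict.foldl_insert_getD_add_one_eq_counter [c0,c1,c2,c3]).symm ▸ rfl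
  · exact (PySem.Dict.foldl_insert_getD_add_one_eq_counter [d0,d1,d2,d3]).symm ▸ rfl
  · simp

-- A's full double loop, evaluated to the explicit diagonal / off-diagonal sums
lemma akey (c0 c1 c2 c3 d0 d1 d2 d3 : Char) (r s : List Char) :
    (List.foldl (fun (st : Int × Int) i =>
      List.foldl (fun st j =>
        if PySem.List.pyGetD (d0::d1::d2::d3::s) i ' ' = PySem.List.pyGetD (c0::c1::c2::c3::r) j ' ' then
          if i = j then (st.1 + 1, st.2) else (st.1, st.2 + 1)
        else st) st [0, 1, 2, 3]) ((0 : Int), (0 : Int)) [0, 1, 2, 3])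
    = ((if d0 = c0 then 1 else 0) + (if d1 = c1 then 1 else 0)
         + (if d2 = c2 then 1 else 0) + (if d3 = c3 then 1 else 0),
       ((if d0 = c1 then 1 else 0) + (if d0 = c2 then 1 else 0) + (if d0 = c3 then 1 else 0))
       + ((if d1 = c0 then 1 else 0) + (if d1 = c2 then 1 else 0) + (if d1 = c3 then 1 else 0))
       + ((if d2 = c0 then 1 else 0) + (if d2 = c1 then 1 else 0) + (if d2 = c3 then 1 else 0))
       + ((if d3 = c0 then 1 else 0) + (if d3 = c1 then 1 else 0) + (if d3 = c2 then 1 else 0))) := by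
  have unroll : ∀ (F : Int × Int → Int → Int × Int) (init : Int × Int),
      List.foldl F init [0, 1, 2, 3] = F (F (F (F init 0) 1) 2) 3 := fun F init => rfl
  rw [unroll]
  simp only [pgetD0, pgetD1, pgetD2, pgetD3, inner0, inner1, inner2, inner3]
  norm_num [Prod.ext_iff]

-- B's total (sum over ft.items of n * fu.get(c, 0)) as a plain sum of counts
lemma totalkey (c0 c1 c2 c3 d0 d1 d2 d3 : Char) :
    ((PySem.Dict.counter [d0,d1,d2,d3]).items.foldl
        (fun a kv => a + kv.2 * (PySem.Dict.counter [c0,c1,c2,c3]).getD kv.1 0) 0)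
    = ([d0,d1,d2,d3].map (fun c => ([c0,c1,c2,c3].count c : Int))).sum := by
  rw [PySem.List.foldl_add (g := fun kv : Char × Int => kv.2 * (PySem.Dict.counter [c0,c1,c2,c3]).getD kv.1 0)]
  rw [PySem.Dict.items_counter, List.map_map]
  have h1 : ((fun kv : Char × Int => kv.2 * (PySem.Dict.counter [c0,c1,c2,c3]).getD kv.1 0)
        ∘ fun k => (k, ([d0,d1,d2,d3].count k : Int)))
      = fun k => ([d0,d1,d2,d3].count k : Int) * (([c0,c1,c2,c3].count k : Int)) := by
    funext k
    simp [PySem.Dict.getD_counter]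
  rw [h1, group_sum (fun k => ([c0,c1,c2,c3].count k : Int)) [d0,d1,d2,d3]
        (PySem.Set.ofList [d0,d1,d2,d3]) (PySem.Set.nodup_ofList _)
        (fun c hc => (PySem.Set.mem_ofList _ _).mpr hc)]
  simp

-- ===== VERDICT (by name: the statement is the Claim_ definition above) =====
theorem hesapla_spec : Claim_equal_hesapla := by
  intro tutulan tahmin _
  obtain ⟨c0, c1, c2, c3, r, hu⟩ := list4 (pvPad4 tutulan) (pvPad4_len tutulan)
  obtain ⟨d0, d1, d2, d3, s, ht⟩ := list4 (pvPad4 tahmin) (pvPad4_len tahmin)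
  have hrange : PySem.List.pyRange 0 4 1 = [0, 1, 2, 3] := by decide
  unfold Spec_hesapla hesapla hesapla_alt
  simp only [hrange, hu, ht, slice4]
  rw [bfold, akey, totalkey]
  simp only [List.map_cons, List.map_nil, List.sum_cons, List.sum_nil,
    List.count_cons, List.count_nil, beq_iff_eq]
  push_cast
  simp only [eq_comm (b := d0), eq_comm (b := d1), eq_comm (b := d2), eq_comm (b := d3)]
  refine Prod.ext ?_ ?_
  · simp
  · simp
    ring
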